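-- pv_equiv track=rewrite | github.com/sanketkhandare420-arch/meeting-audio-extractor123 | app.py | split_conversation
-- ===== SOURCE A (Python) =====
-- def split_conversation(result):
--     segments = result["segments"]
--     conversation = []
--
--     speaker_id = 1
--
--     for seg in segments:
--         text = seg["text"].strip()
--
--         if text:
--             conversation.append(f"Speaker {speaker_id}: {text}")
--             speaker_id = 2 if speaker_id == 1 else 1
--
--     return conversation
-- ===== SOURCE B (Python) =====
-- def _pair_up(texts):
--     if not texts:
--         return []
--     if len(texts) == 1:
--         return ["Speaker 1: " + texts[0]]
--     return ["Speaker 1: " + texts[0], "Speaker 2: " + texts[1]] + _pair_up(texts[2:])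
--
--
-- def split_conversation(result):
--     texts = [t for seg in result["segments"] if (t := seg["text"].strip())]
--     return _pair_up(texts)
-- ===== Notes on version B (the rewrite author's own statement) =====
-- stated objective: alternative
-- what changed: The single loop with a mutable speaker toggle is replaced by a filter phase plus a recursive pairwise chunker that emits a literal 'Speaker 1'/'Speaker 2' pair per recursion step, so no speaker state is threaded at all.
import Mathlib
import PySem

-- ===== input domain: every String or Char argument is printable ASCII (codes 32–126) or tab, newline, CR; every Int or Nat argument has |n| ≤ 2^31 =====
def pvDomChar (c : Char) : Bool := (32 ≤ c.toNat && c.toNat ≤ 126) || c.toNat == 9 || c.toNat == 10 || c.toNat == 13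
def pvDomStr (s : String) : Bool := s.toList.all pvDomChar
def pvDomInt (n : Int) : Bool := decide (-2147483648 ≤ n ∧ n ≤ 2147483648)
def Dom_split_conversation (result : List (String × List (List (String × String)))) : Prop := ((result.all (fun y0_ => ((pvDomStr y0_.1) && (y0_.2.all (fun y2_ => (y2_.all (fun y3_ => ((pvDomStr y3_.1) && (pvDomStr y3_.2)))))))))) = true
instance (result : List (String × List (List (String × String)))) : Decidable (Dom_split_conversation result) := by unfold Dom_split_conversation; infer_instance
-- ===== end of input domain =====

-- B replaces the speaker-toggle loop by a filter phase plus a recursive pairwise chunker emitting literal "Speaker 1"/"Speaker 2" pairs (objective: alternative).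


-- ===== PORT A =====
def split_conversation (result : List (String × List (List (String × String)))) : List String :=
  let segments := ((PySem.Dict.mk result).get? "segments").getD []
  (segments.foldl (fun (st : List String × Int) seg =>
      let text := PySem.Str.strip (((PySem.Dict.mk seg).get? "text").getD "")
      if text ≠ "" then
        (st.1 ++ ["Speaker " ++ PySem.Int.toStr st.2 ++ ": " ++ text],
         if st.2 = 1 then 2 else 1)
      else st) ([], 1)).1

-- ===== PORT B =====
-- B's recursive pairwise chunker (_pair_up in Source B)
def pvPairUp : List String → List String
  | [] => []
  | [a] => ["Speaker 1: " ++ a]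
  | a :: b :: rest => ("Speaker 1: " ++ a) :: ("Speaker 2: " ++ b) :: pvPairUp rest

def split_conversation_alt (result : List (String × List (List (String × String)))) : List String :=
  let texts := (((PySem.Dict.mk result).get? "segments").getD []).filterMap (fun seg =>
    let t := PySem.Str.strip (((PySem.Dict.mk seg).get? "text").getD "")
    if t ≠ "" then some t else none)
  pvPairUp texts

-- ===== PRECONDITION & SPEC =====
-- Pre_ excludes inputs on which Python A raises KeyError: a missing "segments" key, or a segment without a "text" key.
def Pre_split_conversation (result : List (String × List (List (String × String)))) : Prop :=
  ((PySem.Dict.mk result).get? "segments").isSome = true ∧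
  ∀ seg ∈ ((PySem.Dict.mk result).get? "segments").getD [],
    ((PySem.Dict.mk seg).get? "text").isSome = true
instance (result : List (String × List (List (String × String)))) : Decidable (Pre_split_conversation result) := by unfold Pre_split_conversation; infer_instance

def pvWitness_split_conversation : (List (String × List (List (String × String)))) :=
  [("segments", [[("text", " hi ")], [("text", "  ")], [("text", "yo")]])]

def Spec_split_conversation (result : List (String × List (List (String × String)))) (out : List String) : Prop := out = split_conversation_alt result
instance (result : List (String × List (List (String × String)))) (out : List String) : Decidable (Spec_split_conversation result out) := by unfold Spec_split_conversation; infer_instance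

-- ===== CLAIM (what is proved, stated in full; the proofs are below) =====
def Claim_equal_split_conversation : Prop := ∀ (result : List (String × List (List (String × String)))), Dom_split_conversation result → Pre_split_conversation result → Spec_split_conversation result (split_conversation result)

-- ===== LEMMAS AND PROOFS =====

-- proof-only helper: A's toggle unrolled on the filtered text list
def pvAux (s : Int) : List String → List String
  | [] => []
  | a :: rest => ("Speaker " ++ PySem.Int.toStr s ++ ": " ++ a) :: pvAux (if s = 1 then 2 else 1) rest

def pvTexts (segments : List (List (String × String))) : List String :=
  segments.filterMap (fun seg =>
    let t := PySem.Str.strip (((PySem.Dict.mk seg).get? "text").getD "")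
    if t ≠ "" then some t else none)

theorem fold_eq_aux (segs : List (List (String × String))) :
    ∀ (conv : List String) (s : Int),
    (segs.foldl (fun (st : List String × Int) seg =>
        let text := PySem.Str.strip (((PySem.Dict.mk seg).get? "text").getD "")
        if text ≠ "" then
          (st.1 ++ ["Speaker " ++ PySem.Int.toStr st.2 ++ ": " ++ text],
           if st.2 = 1 then 2 else 1)
        else st) (conv, s)).1 = conv ++ pvAux s (pvTexts segs) := by
  induction segs with
  | nil => intro conv s; simp [pvTexts, pvAux]
  | cons seg rest ih =>
    intro conv s
    by_cases h : PySem.Str.strip (((PySem.Dict.mk seg).get? "text").getD "") = ""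
    · simp only [List.foldl_cons, pvTexts, List.filterMap_cons, h]
      simpa [pvTexts] using ih conv s
    · simp only [List.foldl_cons, pvTexts, List.filterMap_cons, if_neg h, ite_not]
      have := ih (conv ++ ["Speaker " ++ PySem.Int.toStr s ++ ": "
          ++ PySem.Str.strip (((PySem.Dict.mk seg).get? "text").getD "")]) (if s = 1 then 2 else 1)
      simp only [ite_not] at this
      rw [this]
      simp [pvAux, pvTexts, List.append_assoc]

theorem aux_one_eq_pairUp : ∀ ts, pvAux 1 ts = pvPairUp ts
  | [] => rfl
  | [a] => by
      simp only [pvAux, pvPairUp]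
      rw [show ("Speaker " ++ PySem.Int.toStr 1 ++ ": " : String) = "Speaker 1: " from rfl]
  | a :: b :: rest => by
      have ih := aux_one_eq_pairUp rest
      simp only [pvAux, pvPairUp]
      norm_num
      rw [show ("Speaker " ++ PySem.Int.toStr 1 ++ ": " : String) = "Speaker 1: " from rfl,
          show ("Speaker " ++ PySem.Int.toStr 2 ++ ": " : String) = "Speaker 2: " from rfl, ih]
      exact ⟨rfl, rfl, rfl⟩

-- ===== VERDICT (by name: the statement is the Claim_ definition above) =====
theorem split_conversation_spec : Claim_equal_split_conversation := by
  intro result _ _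
  unfold Spec_split_conversation split_conversation split_conversation_alt
  rw [fold_eq_aux (((PySem.Dict.mk result).get? "segments").getD []) [] 1]
  simp [aux_one_eq_pairUp, pvTexts]
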